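-- pv_equiv track=rewrite | github.com/htang7415/Max-Handbook | modules/ai-agents/evaluation/agent-evaluation-basics/python/agent_evaluation_basics.py | failure_breakdown
-- ===== SOURCE A (Python) =====
-- def failure_breakdown(labels: list[str]) -> dict[str, int]:
--     counts: dict[str, int] = {}
--     for label in labels:
--         cleaned = label.strip()
--         if not cleaned:
--             continue
--         counts[cleaned] = counts.get(cleaned, 0) + 1
--     return counts
-- ===== SOURCE B (Python) =====
-- def failure_breakdown(labels: list[str]) -> dict[str, int]:
--     cleaned = [c for c in (s.strip() for s in labels) if c]
--     pairs: list[tuple[str, int]] = []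
--     xs = cleaned
--     while xs:
--         key = xs[0]
--         same = [x for x in xs if x == key]
--         xs = [x for x in xs if x != key]
--         pairs.append((key, len(same)))
--     return dict(pairs)
-- ===== Notes on version B (the rewrite author's own statement) =====
-- stated objective: alternative
-- what changed: B replaces A's single-pass dict accumulation by a dict-free partition grouping: it strips/filters once, then repeatedly takes the first remaining label as key, partitions the remaining list into equal/unequal elements, emits (key, count of equal) and continues on the unequal remainder.
import Mathlib
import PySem

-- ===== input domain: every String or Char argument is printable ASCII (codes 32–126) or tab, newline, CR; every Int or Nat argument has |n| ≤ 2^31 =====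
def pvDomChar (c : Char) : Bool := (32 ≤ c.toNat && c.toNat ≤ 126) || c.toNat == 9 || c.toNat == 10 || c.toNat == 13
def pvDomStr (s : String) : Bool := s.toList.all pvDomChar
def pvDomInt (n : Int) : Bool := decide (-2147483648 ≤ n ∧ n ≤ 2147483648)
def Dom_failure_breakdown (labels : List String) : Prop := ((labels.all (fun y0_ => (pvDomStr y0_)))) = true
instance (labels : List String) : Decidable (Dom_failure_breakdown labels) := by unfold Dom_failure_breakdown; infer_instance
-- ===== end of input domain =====

-- B replaces A's single-pass dict accumulation by a dict-free recursive partition-and-conquer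
-- grouping (take first key, partition equal/unequal, recurse on the remainder); alternative
-- decomposition, same result.

-- ===== PORT A =====
def failure_breakdown (labels : List String) : List (String × Int) :=
  (labels.foldl (fun counts label =>
      let cleaned := PySem.Str.strip label
      if cleaned = "" then counts
      else counts.insert cleaned (counts.getD cleaned 0 + 1))
    PySem.Dict.empty).items

-- ===== PORT B =====
-- the recursive helper 'group' of Source B
def fbGroup : List String → List (String × Int)
  | [] => []
  | x :: xs =>
    let same := (x :: xs).filter (fun y => y == x)
    let rest := (x :: xs).filter (fun y => !(y == x))
    (x, (same.length : Int)) :: fbGroup rest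
  termination_by l => l.length
  decreasing_by
    simp only [List.filter_cons, beq_self_eq_true, Bool.not_true, List.length_cons]
    exact Nat.lt_succ_of_le (List.length_filter_le _ _)

def failure_breakdown_alt (labels : List String) : List (String × Int) :=
  let cleaned := (labels.map PySem.Str.strip).filter (fun c => !(c == ""))
  fbGroup cleaned

-- ===== PRECONDITION & SPEC =====
def Spec_failure_breakdown (labels : List String) (out : List (String × Int)) : Prop := out = failure_breakdown_alt labels
instance (labels : List String) (out : List (String × Int)) : Decidable (Spec_failure_breakdown labels out) := by unfold Spec_failure_breakdown; infer_instance

-- ===== CLAIM (what is proved, stated in full; the proofs are below) =====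
def Claim_equal_failure_breakdown : Prop := ∀ (labels : List String), Dom_failure_breakdown labels → Spec_failure_breakdown labels (failure_breakdown labels)

-- ===== LEMMAS AND PROOFS =====

-- folding Set.add over a list ignores elements already contained in the accumulator
theorem pv_foldl_add_filter {x : String} : ∀ (xs acc : List String), acc.contains x →
    List.foldl PySem.Set.add acc xs
      = List.foldl PySem.Set.add acc (xs.filter (fun y => !(y == x))) := by
  intro xs
  induction xs with
  | nil => intro acc _; rfl
  | cons y ys ih =>
    intro acc hacc
    have hmem : x ∈ acc := by simpa using hacc
    by_cases hy : (y == x) = true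
    · have hyx : y = x := eq_of_beq hy
      have : PySem.Set.add acc y = acc := by
        simp [PySem.Set.add, PySem.Set.contains, hyx, hmem]
      simp [hy, List.foldl_cons, this, ih acc hacc]
    · have hy' : (y == x) = false := by simpa using hy
      have hacc' : (PySem.Set.add acc y).contains x := by
        unfold PySem.Set.add
        split
        · exact hacc
        · simp [hmem]
      simp [hy', List.foldl_cons, ih _ hacc']

-- an accumulator head not occurring in the list stays in front
theorem pv_foldl_add_head {x : String} : ∀ (l acc : List String),
    (∀ y ∈ l, (y == x) = false) →
    List.foldl PySem.Set.add (x :: acc) l = x :: List.foldl PySem.Set.add acc l := by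
  intro l
  induction l with
  | nil => intro acc _; rfl
  | cons y ys ih =>
    intro acc h
    have hy : (y == x) = false := h y (by simp)
    have : PySem.Set.add (x :: acc) y = x :: PySem.Set.add acc y := by
      unfold PySem.Set.add
      have hc : PySem.Set.contains (x :: acc) y = PySem.Set.contains acc y := by
        have hyne : y ≠ x := by simpa using hy
        simp [PySem.Set.contains]
        exact fun he => absurd he hyne
      rw [hc]
      split <;> simp
    rw [List.foldl_cons, List.foldl_cons, this,
        ih (PySem.Set.add acc y) (fun z hz => h z (by simp [hz]))]

theorem pv_dedup_cons (x : String) (xs : List String) :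
    PySem.List.dedup (x :: xs)
      = x :: PySem.List.dedup (xs.filter (fun y => !(y == x))) := by
  unfold PySem.List.dedup PySem.Set.ofList
  have h1 : List.foldl PySem.Set.add PySem.Set.empty (x :: xs)
      = List.foldl PySem.Set.add [x] xs := by
    simp [PySem.Set.add, PySem.Set.empty, PySem.Set.contains]
  rw [h1, pv_foldl_add_filter (x := x) xs [x] (by simp)]
  have := pv_foldl_add_head (x := x) (xs.filter (fun y => !(y == x))) [] (by
    intro y hy
    have := List.of_mem_filter hy
    simpa using this)
  simpa [PySem.Set.empty] using this

-- the recursive grouping computes (dedup, count) pairs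
theorem pv_fbGroup_eq : ∀ (l : List String),
    fbGroup l = (PySem.List.dedup l).map (fun k => (k, (l.count k : Int))) := by
  intro l
  induction hn : l.length using Nat.strong_induction_on generalizing l with
  | _ n ih =>
    match l with
    | [] => simp [fbGroup, PySem.List.dedup, PySem.Set.ofList]
    | x :: xs =>
      rw [fbGroup, pv_dedup_cons]
      have hrest : (x :: xs).filter (fun y => !(y == x)) = xs.filter (fun y => !(y == x)) := by
        simp
      have hlen : (xs.filter (fun y => !(y == x))).length < n := by
        subst hn
        exact Nat.lt_succ_of_le (List.length_filter_le _ _)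
      rw [hrest, List.map_cons]
      congr 1
      · simp [List.count, List.countP_eq_length_filter]
      · rw [ih _ hlen _ rfl]
        apply List.map_congr_left
        intro k hk
        have hkmem : k ∈ xs.filter (fun y => !(y == x)) := by
          have := (PySem.List.mem_dedup _ _).mp hk
          exact this
        have hkx : (k == x) = false := by
          have := List.of_mem_filter hkmem
          simpa using this
        congr 1
        have h1 : (xs.filter (fun y => !(y == x))).count k = xs.count k := by
          apply List.count_filter
          simp [hkx]
        have h2 : (x :: xs).count k = xs.count k := by
          rw [List.count_cons]
          have : (x == k) = false := by
            rw [show (x == k) = (k == x) from by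
              by_cases hxy : x = k <;> simp [hxy, BEq.comm]]
            exact hkx
          simp [this]
        rw [h1, h2]

-- ===== VERDICT (by name: the statement is the Claim_ definition above) =====
theorem failure_breakdown_spec : Claim_equal_failure_breakdown := by
  intro labels _
  show failure_breakdown labels = failure_breakdown_alt labels
  unfold failure_breakdown failure_breakdown_alt
  rw [pv_fbGroup_eq]
  have hmap := List.foldl_map (f := PySem.Str.strip)
    (g := fun (counts : PySem.Dict String Int) c =>
      if ¬ (c = "") then counts.insert c (counts.getD c 0 + 1) else counts)
    (l := labels) (init := PySem.Dict.empty)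
  rw [show (fun (counts : PySem.Dict String Int) label =>
      let cleaned := PySem.Str.strip label
      if cleaned = "" then counts
      else counts.insert cleaned (counts.getD cleaned 0 + 1))
    = (fun counts label =>
      if ¬ (PySem.Str.strip label = "") then
        (counts : PySem.Dict String Int).insert (PySem.Str.strip label)
          (counts.getD (PySem.Str.strip label) 0 + 1)
      else counts) from by
    funext c l; by_cases h : PySem.Str.strip l = "" <;> simp [h]]
  rw [← hmap, PySem.List.foldl_ite_eq_foldl_filter]
  rw [show (fun (x : String) => decide ¬(x = "")) = (fun c => !(c == "")) from by
    funext x; rw [decide_not]; congr 1]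
  rw [PySem.Dict.foldl_insert_getD_add_one_eq_counter, PySem.Dict.items_counter]
  simp [PySem.List.dedup_eq_ofList]
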